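-- pv_equiv track=rewrite | github.com/KrushnaSonwane/LeetCode-Solutions | 2038-remove-colored-pieces-if-both-neighbors-are-the-same-color/2038-remove-colored-pieces-if-both-neighbors-are-the-same-color.py | winnerOfGame
-- ===== SOURCE A (Python) =====
-- def winnerOfGame(colors):
--     """
--     :type colors: str
--     :rtype: bool
--     """
--     A, B = 0, 0
--     count = 0
--     for color in colors:
--         if color == 'A': count += 1
--         else:
--             if count >= 3:
--                 A += count - 2
--             count = 0
--     if count >= 2:
--         A += count - 2
--     count = 0
--     for color in colors:
--         if color == 'B':
--             count += 1
--         else: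
--             if count >= 3:
--                 B += count - 2
--             count = 0
--     if count >= 3:
--         B += count - 2
--     if A > B: return 1
--     if A == B: return 0
--     return 0
-- ===== SOURCE B (Python) =====
-- def winnerOfGame(colors):
--     """
--     :type colors: str
--     :rtype: bool
--     """
--     a = b = 0
--     cur = None
--     run = 0
--     for ch in colors:
--         if ch == cur:
--             run += 1
--         else:
--             if run >= 3:
--                 if cur == 'A':
--                     a += run - 2
--                 elif cur == 'B':
--                     b += run - 2
--             cur = ch
--             run = 1
--     if run >= 3:
--         if cur == 'A':
--             a += run - 2
--         elif cur == 'B':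
--             b += run - 2
--     return 1 if a > b else 0
-- ===== Notes on version B (the rewrite author's own statement) =====
-- stated objective: alternative
-- what changed: Replaces A's two separate full scans (one counting 'A'-runs, one counting 'B'-runs) by a single pass over maximal equal-character runs that credits both players from the same run-length state.
import Mathlib
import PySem

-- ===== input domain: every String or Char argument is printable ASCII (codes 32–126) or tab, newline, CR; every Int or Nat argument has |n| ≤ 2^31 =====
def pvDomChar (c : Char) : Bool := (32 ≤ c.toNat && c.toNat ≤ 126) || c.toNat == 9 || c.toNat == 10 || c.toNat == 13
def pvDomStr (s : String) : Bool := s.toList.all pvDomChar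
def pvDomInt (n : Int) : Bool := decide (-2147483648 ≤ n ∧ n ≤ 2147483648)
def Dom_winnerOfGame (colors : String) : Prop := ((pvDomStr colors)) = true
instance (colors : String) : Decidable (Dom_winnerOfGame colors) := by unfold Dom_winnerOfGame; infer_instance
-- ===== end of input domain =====

-- B replaces A's two separate full scans with one pass over maximal equal-character runs; same return value, no speed claim.

-- ===== PORT A =====
-- first loop: count maximal runs of 'A' (reset on any other char)
def aStepA (st : Int × Int) (c : Char) : Int × Int :=
  if c = 'A' then (st.1, st.2 + 1)
  else (if st.2 ≥ 3 then st.1 + (st.2 - 2) else st.1, 0)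

-- second loop: count maximal runs of 'B'
def aStepB (st : Int × Int) (c : Char) : Int × Int :=
  if c = 'B' then (st.1, st.2 + 1)
  else (if st.2 ≥ 3 then st.1 + (st.2 - 2) else st.1, 0)

def winnerOfGame (colors : String) : Int :=
  let pA := colors.toList.foldl aStepA (0, 0)
  let A := if pA.2 ≥ 2 then pA.1 + (pA.2 - 2) else pA.1
  let pB := colors.toList.foldl aStepB (0, 0)
  let B := if pB.2 ≥ 3 then pB.1 + (pB.2 - 2) else pB.1
  if A > B then 1 else if A = B then 0 else 0

-- ===== PORT B =====
-- close the current run: credit whichever player owns it (if length ≥ 3)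
def bFlush (a b : Int) (cur : Option Char) (run : Int) : Int × Int :=
  if run ≥ 3 then
    if cur = some 'A' then (a + (run - 2), b)
    else if cur = some 'B' then (a, b + (run - 2))
    else (a, b)
  else (a, b)

def bStep (st : Int × Int × Option Char × Int) (ch : Char) : Int × Int × Option Char × Int :=
  let (a, b, cur, run) := st
  if some ch = cur then (a, b, cur, run + 1)
  else
    let (a', b') := bFlush a b cur run
    (a', b', some ch, 1)

def winnerOfGame_alt (colors : String) : Int :=
  let st := colors.toList.foldl bStep (0, 0, none, 0)
  let fl := bFlush st.1 st.2.1 st.2.2.1 st.2.2.2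
  if fl.1 > fl.2 then 1 else 0

-- ===== PRECONDITION & SPEC =====
def Spec_winnerOfGame (colors : String) (out : Int) : Prop := out = winnerOfGame_alt colors
instance (colors : String) (out : Int) : Decidable (Spec_winnerOfGame colors out) := by unfold Spec_winnerOfGame; infer_instance

-- ===== CLAIM (what is proved, stated in full; the proofs are below) =====
def Claim_equal_winnerOfGame : Prop := ∀ (colors : String), Dom_winnerOfGame colors → Spec_winnerOfGame colors (winnerOfGame colors)

-- ===== LEMMAS AND PROOFS =====

-- Invariant tying A's two fold states to B's single run-tracking state
def pvInv (pA pB : Int × Int) (q : Int × Int × Option Char × Int) : Prop :=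
  match q.2.2.1 with
  | none => pA = (q.1, 0) ∧ pB = (q.2.1, 0)
  | some c =>
    if c = 'A' then pA = (q.1, q.2.2.2) ∧ pB = (q.2.1, 0)
    else if c = 'B' then pA = (q.1, 0) ∧ pB = (q.2.1, q.2.2.2)
    else pA = (q.1, 0) ∧ pB = (q.2.1, 0)

theorem inv_step (pA pB : Int × Int) (q : Int × Int × Option Char × Int) (ch : Char)
    (h : pvInv pA pB q) : pvInv (aStepA pA ch) (aStepB pB ch) (bStep q ch) := by
  obtain ⟨a, b, cur, run⟩ := q
  obtain ⟨A1, c1⟩ := pA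
  obtain ⟨B1, c2⟩ := pB
  cases cur with
  | none =>
    simp only [pvInv, Prod.mk.injEq] at h
    by_cases h1 : ch = 'A' <;> by_cases h2 : ch = 'B' <;>
      simp_all [pvInv, aStepA, aStepB, bStep, bFlush]
  | some c =>
    by_cases hc1 : c = 'A' <;> by_cases hc2 : c = 'B' <;>
      by_cases h1 : ch = 'A' <;> by_cases h2 : ch = 'B' <;> by_cases h3 : ch = c <;>
      simp_all only [pvInv, Prod.mk.injEq, if_pos] <;>
      simp_all [aStepA, aStepB, bStep, bFlush] <;> split_ifs <;> simp_all

theorem inv_foldl (s : List Char) (pA pB : Int × Int) (q : Int × Int × Option Char × Int)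
    (h : pvInv pA pB q) :
    pvInv (s.foldl aStepA pA) (s.foldl aStepB pB) (s.foldl bStep q) := by
  induction s generalizing pA pB q with
  | nil => exact h
  | cons ch t ih => exact ih _ _ _ (inv_step _ _ _ _ h)

-- ===== VERDICT (by name: the statement is the Claim_ definition above) =====
theorem final_eq (pA pB : Int × Int) (q : Int × Int × Option Char × Int)
    (h : pvInv pA pB q) :
    (if (if pA.2 ≥ 2 then pA.1 + (pA.2 - 2) else pA.1) >
        (if pB.2 ≥ 3 then pB.1 + (pB.2 - 2) else pB.1) then (1 : Int)
     else if (if pA.2 ≥ 2 then pA.1 + (pA.2 - 2) else pA.1) =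
             (if pB.2 ≥ 3 then pB.1 + (pB.2 - 2) else pB.1) then 0 else 0) =
    (if (bFlush q.1 q.2.1 q.2.2.1 q.2.2.2).1 > (bFlush q.1 q.2.1 q.2.2.1 q.2.2.2).2 then 1 else 0) := by
  obtain ⟨a, b, cur, run⟩ := q
  obtain ⟨A1, c1⟩ := pA
  obtain ⟨B1, c2⟩ := pB
  cases cur with
  | none =>
    simp only [pvInv, Prod.mk.injEq] at h
    obtain ⟨⟨rfl, rfl⟩, rfl, rfl⟩ := h
    simp [bFlush]
  | some c =>
    by_cases hc1 : c = 'A' <;> by_cases hc2 : c = 'B' <;>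
      simp_all only [pvInv, if_pos, Prod.mk.injEq] <;>
      obtain ⟨⟨rfl, rfl⟩, rfl, rfl⟩ := h <;>
      simp_all [bFlush] <;> split_ifs <;> simp_all <;> omega

-- ===== VERDICT (by name: the statement is the Claim_ definition above) =====
theorem winnerOfGame_spec : Claim_equal_winnerOfGame := by
  intro colors _
  have h := inv_foldl colors.toList (0, 0) (0, 0) (0, 0, none, 0) (by simp [pvInv])
  simp only [Spec_winnerOfGame, winnerOfGame, winnerOfGame_alt]
  exact final_eq _ _ _ h
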